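-- pv_equiv track=rewrite | github.com/andrewmcknight/ceol-gpt | app.py | _wrap_bars
-- ===== SOURCE A (Python) =====
-- _BAR_TOKENS = {'|', '||', '|:', ':|', '::', '|]', '[|'}
--
-- def _wrap_bars(music_body: str, bars_per_line: int = 4) -> str:
--     """Insert newlines every `bars_per_line` bars for readable ABC output.
--
--     This is purely a display post-process — the tokenizer and model are
--     unchanged.  abcjs uses newlines to decide where to wrap staff lines.
--     """
--     tokens = music_body.split()
--     lines: list[list[str]] = []
--     current: list[str] = []
--     bar_count = 0
--
--     for tok in tokens:
--         current.append(tok)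
--         if tok in _BAR_TOKENS:
--             bar_count += 1
--             if bar_count % bars_per_line == 0:
--                 lines.append(current)
--                 current = []
--
--     if current:
--         lines.append(current)
--
--     return "\n".join(" ".join(line) for line in lines)
-- ===== SOURCE B (Python) =====
-- _BAR_TOKENS = {'|', '||', '|:', ':|', '::', '|]', '[|'}
--
--
-- def _wrap_bars(music_body: str, bars_per_line: int = 4) -> str:
--     """Staged slicing: find bar positions, pick every bars_per_line-th one as a
--     cut point, slice the token list at the cuts and join the slices."""
--     tokens = music_body.split()
--     bar_positions = [i for i, t in enumerate(tokens) if t in _BAR_TOKENS]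
--     cuts = [p for k, p in enumerate(bar_positions, 1) if k % bars_per_line == 0]
--     segments = []
--     start = 0
--     for c in cuts:
--         segments.append(tokens[start:c + 1])
--         start = c + 1
--     if start < len(tokens):
--         segments.append(tokens[start:])
--     return "\n".join(" ".join(seg) for seg in segments)
-- ===== Notes on version B (the rewrite author's own statement) =====
-- stated objective: alternative
-- what changed: B replaces A's single accumulate-and-flush loop with staged passes: it first collects the indices of all bar tokens, then picks every bars_per_line-th bar index as a cut point, then slices the token list at those cut points and joins the slices; no running line buffer exists.
import Mathlib
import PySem

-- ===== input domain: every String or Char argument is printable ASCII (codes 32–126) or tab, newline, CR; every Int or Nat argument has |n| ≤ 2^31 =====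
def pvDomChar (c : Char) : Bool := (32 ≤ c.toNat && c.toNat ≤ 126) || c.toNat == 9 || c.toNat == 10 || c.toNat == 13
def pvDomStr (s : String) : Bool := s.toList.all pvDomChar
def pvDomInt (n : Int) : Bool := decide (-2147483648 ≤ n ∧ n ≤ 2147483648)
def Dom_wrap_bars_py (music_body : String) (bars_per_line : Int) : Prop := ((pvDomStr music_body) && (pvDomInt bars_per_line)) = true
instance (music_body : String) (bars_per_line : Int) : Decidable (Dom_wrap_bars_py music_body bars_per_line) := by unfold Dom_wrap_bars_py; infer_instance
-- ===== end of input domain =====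

-- B replaces A's accumulate-and-flush loop with staged passes (bar positions → cut indices → slices); objective: alternative, same cost.

-- ===== PORT A =====
def pvBarTokens : List String := ["|", "||", "|:", ":|", "::", "|]", "[|"]

-- the for-loop of A with state (lines, current, bar_count)
def wrapALoop (bpl : Int) : List String → List (List String) → List String → Int → (List (List String) × List String)
  | [], lines, current, _ => (lines, current)
  | tok :: rest, lines, current, bc =>
    let current' := current ++ [tok]
    if pvBarTokens.contains tok then
      let bc' := bc + 1
      if PySem.Int.mod bc' bpl == 0 then wrapALoop bpl rest (lines ++ [current']) [] bc'
      else wrapALoop bpl rest lines current' bc'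
    else wrapALoop bpl rest lines current' bc

def wrap_bars_py (music_body : String) (bars_per_line : Int) : String :=
  let tokens := PySem.Str.split₀ music_body
  let r := wrapALoop bars_per_line tokens [] [] 0
  let lines := if r.2 ≠ [] then r.1 ++ [r.2] else r.1
  PySem.Str.join "\n" (lines.map (fun line => PySem.Str.join " " line))

-- ===== PORT B =====
-- [p for k, p in enumerate(bar_positions, 1) if k % bars_per_line == 0]
def pvCuts (bpl : Int) (k : Int) (ps : List Int) : List Int :=
  ((PySem.List.enumerate ps k).filter (fun p => PySem.Int.mod p.1 bpl == 0)).map (·.2)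

-- the 'for c in cuts' slicing loop of B, plus the trailing 'if start < len(tokens)'
def segLoop (tokens : List String) : List Int → Int → List (List String)
  | [], start => if start < (tokens.length : Int) then [PySem.List.slice tokens (some start) none] else []
  | c :: cs, start => PySem.List.slice tokens (some start) (some (c + 1)) :: segLoop tokens cs (c + 1)

def wrap_bars_py_alt (music_body : String) (bars_per_line : Int) : String :=
  let tokens := PySem.Str.split₀ music_body
  -- [i for i, t in enumerate(tokens) if t in _BAR_TOKENS]
  let barPositions := ((PySem.List.enumerate tokens 0).filter (fun p => pvBarTokens.contains p.2)).map (·.1)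
  let cuts := pvCuts bars_per_line 1 barPositions
  PySem.Str.join "\n" ((segLoop tokens cuts 0).map (fun seg => PySem.Str.join " " seg))

-- ===== PRECONDITION & SPEC =====
-- Pre_ excludes exactly the inputs where Python A raises ZeroDivisionError:
-- bars_per_line == 0 while the body contains a bar token (the '%' is then reached).
def Pre_wrap_bars_py (music_body : String) (bars_per_line : Int) : Prop :=
  bars_per_line ≠ 0 ∨ (PySem.Str.split₀ music_body).all (fun t => !pvBarTokens.contains t) = true
instance (music_body : String) (bars_per_line : Int) : Decidable (Pre_wrap_bars_py music_body bars_per_line) := by unfold Pre_wrap_bars_py; infer_instance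

def pvWitness_wrap_bars_py : String × Int := ("C D | E F | G A | B c |", 2)

def Spec_wrap_bars_py (music_body : String) (bars_per_line : Int) (out : String) : Prop := out = wrap_bars_py_alt music_body bars_per_line
instance (music_body : String) (bars_per_line : Int) (out : String) : Decidable (Spec_wrap_bars_py music_body bars_per_line out) := by unfold Spec_wrap_bars_py; infer_instance

-- ===== CLAIM (what is proved, stated in full; the proofs are below) =====
def Claim_equal_wrap_bars_py : Prop := ∀ (music_body : String) (bars_per_line : Int), Dom_wrap_bars_py music_body bars_per_line → Pre_wrap_bars_py music_body bars_per_line → Spec_wrap_bars_py music_body bars_per_line (wrap_bars_py music_body bars_per_line)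

-- ===== LEMMAS AND PROOFS =====

-- reference: the list of display lines, direct recursion (no accumulator)
def wrapGroups (bpl : Int) : List String → List String → Int → List (List String)
  | [], cur, _ => if cur = [] then [] else [cur]
  | tok :: rest, cur, bc =>
    let cur' := cur ++ [tok]
    if pvBarTokens.contains tok then
      let bc' := bc + 1
      if PySem.Int.mod bc' bpl == 0 then cur' :: wrapGroups bpl rest [] bc'
      else wrapGroups bpl rest cur' bc'
    else wrapGroups bpl rest cur' bc

theorem wrapALoop_eq (bpl : Int) (toks : List String) :
    ∀ (lines : List (List String)) (cur : List String) (bc : Int),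
      (wrapALoop bpl toks lines cur bc).1 ++
        (if (wrapALoop bpl toks lines cur bc).2 = [] then [] else [(wrapALoop bpl toks lines cur bc).2]) =
      lines ++ wrapGroups bpl toks cur bc := by
  induction toks with
  | nil =>
    intro lines cur bc
    simp [wrapALoop, wrapGroups]
  | cons tok rest ih =>
    intro lines cur bc
    by_cases h1 : pvBarTokens.contains tok = true
    · by_cases h2 : (PySem.Int.mod (bc + 1) bpl == 0) = true
      · simp only [wrapALoop, wrapGroups, h1, h2, if_true]
        rw [ih]; simp
      · simp only [wrapALoop, wrapGroups, h1, h2, if_true, if_false, Bool.false_eq_true]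
        rw [ih]
    · simp only [wrapALoop, wrapGroups, h1, if_false, Bool.false_eq_true]
      rw [ih]

-- B-side abbreviations used only in the proofs
def pvBarPos (toks : List String) : List Int :=
  ((PySem.List.enumerate toks 0).filter (fun p => pvBarTokens.contains p.2)).map (·.1)

def pvSegsB (bpl k : Int) (toks : List String) : List (List String) :=
  segLoop toks (pvCuts bpl k (pvBarPos toks)) 0

-- prepend a prefix to the first line (empty prefix disappears on the empty list)
def consHead (pre : List String) : List (List String) → List (List String)
  | [] => if pre = [] then [] else [pre]
  | s :: r => (pre ++ s) :: r

theorem consHead_nil (X : List (List String)) : consHead [] X = X := by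
  cases X <;> simp [consHead]

theorem consHead_consHead (cur : List String) (tok : String) (X : List (List String)) :
    consHead cur (consHead [tok] X) = consHead (cur ++ [tok]) X := by
  cases X <;> simp [consHead]

theorem enumerate_shift {α : Type} (xs : List α) :
    ∀ s : Int, PySem.List.enumerate xs (s + 1) =
      (PySem.List.enumerate xs s).map (fun p => (p.1 + 1, p.2)) := by
  induction xs with
  | nil => intro s; simp [PySem.List.enumerate_nil]
  | cons x xs ih => intro s; simp [PySem.List.enumerate_cons, ih]

theorem enumerate_map_val {α β : Type} (f : α → β) (xs : List α) :
    ∀ s : Int, PySem.List.enumerate (xs.map f) s =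
      (PySem.List.enumerate xs s).map (fun p => (p.1, f p.2)) := by
  induction xs with
  | nil => intro s; simp [PySem.List.enumerate_nil]
  | cons x xs ih => intro s; simp [PySem.List.enumerate_cons, ih]

theorem pvBarPos_cons (tok : String) (rest : List String) :
    pvBarPos (tok :: rest) =
      (if pvBarTokens.contains tok then [(0 : Int)] else []) ++ (pvBarPos rest).map (· + 1) := by
  unfold pvBarPos
  rw [PySem.List.enumerate_cons, enumerate_shift]
  by_cases h : tok ∈ pvBarTokens <;>
    simp [h, List.filter_map, List.map_map, Function.comp_def]

theorem pvBarPos_nonneg (toks : List String) : ∀ c ∈ pvBarPos toks, 0 ≤ c := by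
  intro c hc
  unfold pvBarPos at hc
  simp only [List.mem_map, List.mem_filter] at hc
  obtain ⟨p, ⟨hp, _⟩, rfl⟩ := hc
  rw [PySem.List.mem_enumerate_iff] at hp
  obtain ⟨k, _, rfl⟩ := hp
  simp

theorem pvCuts_map_add (bpl k : Int) (ps : List Int) :
    pvCuts bpl k (ps.map (· + 1)) = (pvCuts bpl k ps).map (· + 1) := by
  unfold pvCuts
  rw [enumerate_map_val]
  simp [List.filter_map, List.map_map, Function.comp_def]

theorem pvCuts_cons (bpl k : Int) (p : Int) (ps : List Int) :
    pvCuts bpl k (p :: ps) =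
      (if PySem.Int.mod k bpl == 0 then [p] else []) ++ pvCuts bpl (k + 1) ps := by
  unfold pvCuts
  rw [PySem.List.enumerate_cons]
  by_cases h : (PySem.Int.mod k bpl == 0) = true <;> simp [h]

theorem pvCuts_nonneg (bpl : Int) (ps : List Int) (hps : ∀ c ∈ ps, 0 ≤ c) :
    ∀ k, ∀ c ∈ pvCuts bpl k ps, 0 ≤ c := by
  intro k c hc
  unfold pvCuts at hc
  simp only [List.mem_map, List.mem_filter] at hc
  obtain ⟨p, ⟨hp, _⟩, rfl⟩ := hc
  have := PySem.List.map_snd_enumerate (xs := ps) (s := k)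
  exact hps p.2 (by rw [← this]; exact List.mem_map_of_mem hp)

theorem slice_cons_shift (tok : String) (rest : List String) (a b : Int)
    (ha : 0 ≤ a) (hb : 0 ≤ b) :
    PySem.List.slice (tok :: rest) (some (a + 1)) (some (b + 1)) =
      PySem.List.slice rest (some a) (some b) := by
  rw [PySem.List.slice_toNat _ (by omega) (by omega),
      PySem.List.slice_toNat _ ha hb]
  have h1 : (a + 1).toNat = a.toNat + 1 := by omega
  have h2 : (b + 1).toNat = b.toNat + 1 := by omega
  simp [h1, h2]

theorem segLoop_shift (tok : String) (rest : List String) :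
    ∀ (cs : List Int), (∀ c ∈ cs, 0 ≤ c) → ∀ s : Int, 0 ≤ s →
      segLoop (tok :: rest) (cs.map (· + 1)) (s + 1) = segLoop rest cs s := by
  intro cs
  induction cs with
  | nil =>
    intro _ s hs
    simp only [List.map_nil, segLoop]
    have hlen : (s + 1 < ((tok :: rest).length : Int)) ↔ (s < (rest.length : Int)) := by
      simp only [List.length_cons]; push_cast; omega
    by_cases h : s < (rest.length : Int)
    · rw [if_pos (hlen.mpr h), if_pos h,
        PySem.List.slice_from _ (by omega : (0:Int) ≤ s + 1),
        PySem.List.slice_from _ hs]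
      have : (s + 1).toNat = s.toNat + 1 := by omega
      simp [this]
    · rw [if_neg (fun hh => h (hlen.mp hh)), if_neg h]
  | cons c cs ih =>
    intro hcs s hs
    simp only [List.map_cons, segLoop]
    have hc : 0 ≤ c := hcs c (by simp)
    have : c + 1 + 1 = (c + 1) + 1 := by ring
    rw [slice_cons_shift tok rest s (c + 1) hs (by omega),
        this, ih (fun x hx => hcs x (by simp [hx])) (c + 1) (by omega)]

theorem segLoop_zero_map (tok : String) (rest : List String) (cs : List Int)
    (hcs : ∀ c ∈ cs, 0 ≤ c) :
    segLoop (tok :: rest) (cs.map (· + 1)) 0 = consHead [tok] (segLoop rest cs 0) := by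
  cases cs with
  | nil =>
    simp only [List.map_nil, segLoop]
    have : ((0:Int) < ((tok :: rest).length : Int)) := by
      simp only [List.length_cons]; push_cast; omega
    rw [if_pos this, PySem.List.slice_from _ le_rfl]
    by_cases h : (0:Int) < (rest.length : Int)
    · rw [if_pos h, PySem.List.slice_from _ le_rfl]
      simp [consHead]
    · rw [if_neg h]
      have : rest = [] := by
        cases rest with
        | nil => rfl
        | cons r rs => exfalso; apply h; simp only [List.length_cons]; push_cast; omega
      simp [this, consHead]
  | cons c cs' =>
    simp only [List.map_cons, segLoop]
    have hc : 0 ≤ c := hcs c (by simp)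
    have h1 : PySem.List.slice (tok :: rest) (some 0) (some (c + 1 + 1)) =
        tok :: PySem.List.slice rest (some 0) (some (c + 1)) := by
      rw [PySem.List.slice_toNat _ le_rfl (by omega),
          PySem.List.slice_toNat _ le_rfl (by omega)]
      have h2 : (c + 1 + 1).toNat = (c + 1).toNat + 1 := by omega
      simp [h2]
    rw [h1]
    have : c + 1 + 1 = (c + 1) + 1 := by ring
    rw [this, segLoop_shift tok rest cs' (fun x hx => hcs x (by simp [hx])) (c + 1) (by omega)]
    simp [consHead]

theorem pvSegsB_cons (bpl k : Int) (tok : String) (rest : List String) :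
    pvSegsB bpl k (tok :: rest) =
      if pvBarTokens.contains tok then
        (if PySem.Int.mod k bpl == 0 then [tok] :: pvSegsB bpl (k + 1) rest
         else consHead [tok] (pvSegsB bpl (k + 1) rest))
      else consHead [tok] (pvSegsB bpl k rest) := by
  unfold pvSegsB
  rw [pvBarPos_cons]
  have hnn := pvBarPos_nonneg rest
  by_cases h1 : pvBarTokens.contains tok = true
  · rw [if_pos h1, if_pos h1]
    rw [List.singleton_append, pvCuts_cons]
    by_cases h2 : (PySem.Int.mod k bpl == 0) = true
    · rw [if_pos h2, if_pos h2, List.singleton_append]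
      simp only [segLoop]
      have h0 : PySem.List.slice (tok :: rest) (some 0) (some (0 + 1)) = [tok] := by
        rw [PySem.List.slice_toNat _ le_rfl (by omega)]; simp
      rw [h0, pvCuts_map_add, zero_add]
      have hsh := segLoop_shift tok rest _ (pvCuts_nonneg bpl _ hnn (k + 1)) 0 le_rfl
      norm_num at hsh
      rw [hsh]
    · rw [if_neg h2, if_neg h2, List.nil_append, pvCuts_map_add,
        segLoop_zero_map tok rest _ (pvCuts_nonneg bpl _ hnn (k + 1))]
  · rw [if_neg h1, if_neg h1, List.nil_append, pvCuts_map_add,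
      segLoop_zero_map tok rest _ (pvCuts_nonneg bpl _ hnn k)]

theorem pvSegsB_nil (bpl k : Int) : pvSegsB bpl k [] = [] := by
  simp [pvSegsB, pvBarPos, pvCuts, segLoop, PySem.List.enumerate_nil]

theorem wrapGroups_eq_segsB (bpl : Int) (toks : List String) :
    ∀ (cur : List String) (bc : Int),
      wrapGroups bpl toks cur bc = consHead cur (pvSegsB bpl (bc + 1) toks) := by
  induction toks with
  | nil =>
    intro cur bc
    rw [pvSegsB_nil]
    cases cur <;> simp [wrapGroups, consHead]
  | cons tok rest ih =>
    intro cur bc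
    rw [pvSegsB_cons]
    by_cases h1 : pvBarTokens.contains tok = true
    · by_cases h2 : (PySem.Int.mod (bc + 1) bpl == 0) = true
      · simp only [wrapGroups, h1, h2, if_true]
        rw [ih [] (bc + 1), consHead_nil]
        simp [consHead]
      · simp only [wrapGroups, h1, h2, if_true, if_false, Bool.false_eq_true]
        rw [ih (cur ++ [tok]) (bc + 1), ← consHead_consHead]
    · simp only [wrapGroups, h1, if_false, Bool.false_eq_true]
      rw [ih (cur ++ [tok]) bc, ← consHead_consHead]

-- ===== VERDICT (by name: the statement is the Claim_ definition above) =====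
theorem wrap_bars_py_spec : Claim_equal_wrap_bars_py := by
  intro music_body bpl _ _
  unfold Spec_wrap_bars_py wrap_bars_py wrap_bars_py_alt
  have hA := wrapALoop_eq bpl (PySem.Str.split₀ music_body) [] [] 0
  simp only [List.nil_append] at hA
  have hG := wrapGroups_eq_segsB bpl (PySem.Str.split₀ music_body) [] 0
  rw [consHead_nil, zero_add] at hG
  have hfinal :
      (if (wrapALoop bpl (PySem.Str.split₀ music_body) [] [] 0).2 ≠ [] then
        (wrapALoop bpl (PySem.Str.split₀ music_body) [] [] 0).1 ++
          [(wrapALoop bpl (PySem.Str.split₀ music_body) [] [] 0).2]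
       else (wrapALoop bpl (PySem.Str.split₀ music_body) [] [] 0).1) =
      pvSegsB bpl 1 (PySem.Str.split₀ music_body) := by
    rw [← hG, ← hA]
    by_cases h : (wrapALoop bpl (PySem.Str.split₀ music_body) [] [] 0).2 = [] <;> simp [h]
  simp only [hfinal]
  rfl
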